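-- pv_equiv track=rewrite | github.com/camiloaromero23/aiUSA | ia-parcialPrimerCorte/fourthExercise.py | mappingToNames
-- ===== SOURCE A (Python) =====
-- def mappingToNames(labyrinth):
--     nodeNames = []
--     nodeNumber = 0
--     rowIndex = 0
--     for row in labyrinth:
--         columnIndex = 0
--         for column in row:
--             nodeNames.append('{}'.format(nodeNumber))
--             columnIndex += 1
--             nodeNumber += 1
--         rowIndex += 1
--     return nodeNames
-- ===== SOURCE B (Python) =====
-- def mappingToNames(labyrinth):
--     total = sum(len(row) for row in labyrinth)
--     return [str(i) for i in range(total)]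
-- ===== Notes on version B (the rewrite author's own statement) =====
-- stated objective: simpler
-- what changed: Counts the total number of cells with one sum over row lengths and generates the labels directly from range(total), instead of appending per cell in nested loops with dead rowIndex/columnIndex counters.
import Mathlib
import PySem

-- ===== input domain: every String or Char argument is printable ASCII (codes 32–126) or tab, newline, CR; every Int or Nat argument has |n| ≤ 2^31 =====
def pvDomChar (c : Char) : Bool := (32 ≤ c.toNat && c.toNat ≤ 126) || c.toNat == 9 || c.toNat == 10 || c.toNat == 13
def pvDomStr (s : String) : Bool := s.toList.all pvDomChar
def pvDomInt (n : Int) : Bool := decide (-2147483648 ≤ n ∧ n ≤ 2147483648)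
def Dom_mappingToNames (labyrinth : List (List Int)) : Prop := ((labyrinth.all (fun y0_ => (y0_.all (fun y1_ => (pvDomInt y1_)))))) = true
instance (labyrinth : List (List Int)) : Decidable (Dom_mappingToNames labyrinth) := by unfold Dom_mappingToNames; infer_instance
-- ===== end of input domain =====

-- ===== PORT A =====
-- B replaces the nested append loops by one sum of row lengths plus a map over range(total) (objective: simpler).
def mappingToNames (labyrinth : List (List Int)) : List String :=
  -- state: (nodeNames, nodeNumber, rowIndex); inner state: (nodeNames, columnIndex, nodeNumber)
  (labyrinth.foldl
    (fun (st : List String × Int × Int) row =>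
      let inner := row.foldl
        (fun (st2 : List String × Int × Int) _column =>
          (st2.1 ++ [PySem.Int.toStr st2.2.2], st2.2.1 + 1, st2.2.2 + 1))
        (st.1, 0, st.2.1)
      (inner.1, inner.2.2, st.2.2 + 1))
    ([], 0, 0)).1

-- ===== PORT B =====
def mappingToNames_alt (labyrinth : List (List Int)) : List String :=
  let total : Int := labyrinth.foldl (fun acc row => acc + (row.length : Int)) 0
  (PySem.List.pyRange 0 total 1).map PySem.Int.toStr

-- ===== PRECONDITION & SPEC =====
def Spec_mappingToNames (labyrinth : List (List Int)) (out : List String) : Prop := out = mappingToNames_alt labyrinth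
instance (labyrinth : List (List Int)) (out : List String) : Decidable (Spec_mappingToNames labyrinth out) := by unfold Spec_mappingToNames; infer_instance

-- ===== CLAIM (what is proved, stated in full; the proofs are below) =====
def Claim_equal_mappingToNames : Prop := ∀ (labyrinth : List (List Int)), Dom_mappingToNames labyrinth → Spec_mappingToNames labyrinth (mappingToNames labyrinth)

-- ===== LEMMAS AND PROOFS =====

-- total cell count of the remaining rows (matches B's foldl)
def pvSumLen (l : List (List Int)) : Int := l.foldl (fun acc row => acc + (row.length : Int)) 0

lemma pvSumLen_shift (l : List (List Int)) (a : Int) :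
    l.foldl (fun acc row => acc + (row.length : Int)) a = a + pvSumLen l := by
  induction l generalizing a with
  | nil => simp [pvSumLen]
  | cons r t ih =>
      simp only [pvSumLen, List.foldl_cons]
      rw [ih, ih ((0:Int) + r.length)]
      ring

lemma pvSumLen_nonneg (l : List (List Int)) : 0 ≤ pvSumLen l := by
  induction l with
  | nil => simp [pvSumLen]
  | cons r t ih =>
      simp only [pvSumLen, List.foldl_cons]
      rw [pvSumLen_shift]
      have : (0:Int) ≤ r.length := by positivity
      omega

lemma pvInner (row : List Int) (names : List String) (c n : Int) :
    row.foldl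
        (fun (st2 : List String × Int × Int) _column =>
          (st2.1 ++ [PySem.Int.toStr st2.2.2], st2.2.1 + 1, st2.2.2 + 1))
        (names, c, n)
      = (names ++ (PySem.List.pyRange n (n + row.length) 1).map PySem.Int.toStr,
         c + row.length, n + row.length) := by
  induction row generalizing names c n with
  | nil => simp [PySem.List.pyRange_one_eq_nil]
  | cons x t ih =>
      simp only [List.foldl_cons]
      rw [ih]
      have e : n + ((x :: t).length : Int) = n + 1 + (t.length : Int) := by
        simp [List.length_cons]; ring
      have h : n < n + 1 + (t.length : Int) := by
        have : (0:Int) ≤ t.length := Int.natCast_nonneg _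
        omega
      rw [e, PySem.List.pyRange_one_cons h]
      simp [List.length_cons]
      omega

lemma pvStep_eq :
    (fun (st : List String × Int × Int) (row : List Int) =>
      let inner := row.foldl
        (fun (st2 : List String × Int × Int) _column =>
          (st2.1 ++ [PySem.Int.toStr st2.2.2], st2.2.1 + 1, st2.2.2 + 1))
        (st.1, 0, st.2.1)
      (inner.1, inner.2.2, st.2.2 + 1))
    = (fun (st : List String × Int × Int) (row : List Int) =>
        (st.1 ++ (PySem.List.pyRange st.2.1 (st.2.1 + row.length) 1).map PySem.Int.toStr,
         st.2.1 + row.length, st.2.2 + 1)) := by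
  funext st row
  simp [pvInner]

lemma pvOuter (l : List (List Int)) (names : List String) (n r : Int) :
    (l.foldl
      (fun (st : List String × Int × Int) (row : List Int) =>
        (st.1 ++ (PySem.List.pyRange st.2.1 (st.2.1 + row.length) 1).map PySem.Int.toStr,
         st.2.1 + row.length, st.2.2 + 1))
      (names, n, r))
    = (names ++ (PySem.List.pyRange n (n + pvSumLen l) 1).map PySem.Int.toStr,
       n + pvSumLen l, r + l.length) := by
  induction l generalizing names n r with
  | nil => simp [pvSumLen, PySem.List.pyRange_one_eq_nil]
  | cons row t ih =>
      simp only [List.foldl_cons]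
      rw [ih]
      have hsum : pvSumLen (row :: t) = (row.length : Int) + pvSumLen t := by
        simp only [pvSumLen, List.foldl_cons]
        rw [pvSumLen_shift]
        simp [pvSumLen]
      have h1 : n ≤ n + (row.length : Int) := by
        have : (0:Int) ≤ row.length := Int.natCast_nonneg _
        omega
      have h2 : n + (row.length : Int) ≤ n + pvSumLen (row :: t) := by
        have := pvSumLen_nonneg t
        omega
      rw [PySem.List.pyRange_one_append n (n + (row.length : Int)) _ h1 h2]
      have e : n + pvSumLen (row :: t) = n + (row.length : Int) + pvSumLen t := by
        rw [hsum]; ring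
      simp [e, List.length_cons]
      omega

-- ===== VERDICT (by name: the statement is the Claim_ definition above) =====
theorem mappingToNames_spec : Claim_equal_mappingToNames := by
  intro l _
  show mappingToNames l = mappingToNames_alt l
  unfold mappingToNames mappingToNames_alt
  rw [pvStep_eq, pvOuter]
  simp [pvSumLen]
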